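/- GENERATED by mk_final_copies.py from the proof of the farm's unit `decode_all.1` (farm:decode_all.1.1: Proof.lean) as the
   re-elaboration sweep compiled it — do not edit. -/
import Asan.CheckWalk
import Vorbis.Spec.Units.decode_all_1

/- SEGMENT 1 OF decode_all (entry 1034A0H → `cut1` 10357BH, 34 instructions), in the farm's format: THE PROLOGUE OF A PROTECTED FRAME and
   the call of stb_vorbis_open_memory. From the farm worker's validated script of the whole function (its lemmas `da_*` are in
   Vorbis/Spec/DecodeAll.lean). The four inline shadow addresses are given as BOUNDS before the walk (`da_shadow_bounds`), so that
   stack slots are read through the prologue's shadow stores. The arms `cap < 32` (0x103518) and `cmovns` not taken are dead: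
   rcx = 300000H by the precondition; the walker leaves them with closed bit-vector conditions. -/
open X86 X86.User Asan Vorbis Vorbis.Spec

set_option maxRecDepth 4000
set_option maxHeartbeats 4000000

namespace Vorbis.Spec.decode_all_1

/-- **The caller's footprint through a callee's**: every window of the callee lies inside a window of the caller
(`Reader.sameExcept_through_callee`, which this unit's statement does not import). -/
theorem seg1_through_callee {ws ws' : List Span} {m0 m1 m2 : Mem} (h : Mem.SameExcept ws m0 m1)
    (hs : Mem.SameExcept ws' m1 m2) (hsub : ∀ w ∈ ws', InSpans ws w.lo (w.hi - w.lo)) : Mem.SameExcept ws m0 m2 := by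
  apply h.step_same hs
  intro w hw a h1 h2
  obtain ⟨w', hw', k1, k2⟩ := hsub w hw
  exact ⟨w', hw', by omega, by omega⟩

end Vorbis.Spec.decode_all_1

open Vorbis.Spec.decode_all_1

/-- **Segment 1**: see the head of this file. -/
theorem Vorbis.Spec.Worked.decode_all_1_ok : Vorbis.Spec.decode_all_1.Statement := by
  intro Lay hLay μ hμ u₀ hcode h_open others frames len u ret he hpre
  have he0 := he
  have hpre0 := hpre
  v_entry he
  obtain ⟨hsh, hrdi, hrsi, hlen, hrdx, hrcx, hr8, hr9, hfix, hfree, hconsts⟩ := hpre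
  have hsp := hsh.rsp
  -- the four inline shadow addresses as bounds: without them no load reads a stack slot through the prologue's shadow stores
  obtain ⟨hsa0, hsb0⟩ := decode_all.da_shadow_bounds (u.reg .rsp) 12582912 0 (by omega) (by omega) (by decide) (by decide)
  obtain ⟨hsa4, hsb4⟩ := decode_all.da_shadow_bounds (u.reg .rsp) 12582916 4 (by omega) (by omega) (by decide) (by decide)
  obtain ⟨hsa8, hsb8⟩ := decode_all.da_shadow_bounds (u.reg .rsp) 12582920 8 (by omega) (by omega) (by decide) (by decide)
  obtain ⟨hsa12, hsb12⟩ := decode_all.da_shadow_bounds (u.reg .rsp) 12582924 12 (by omega) (by omega) (by decide) (by decide)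
  have h_open' := h_open others ((((u.reg .rsp).toNat - 184), Vorbis.Frames.decode_all) :: frames) len
  clear h_open
  u_walk hcode [hμ.vendor] until [Vorbis.L.decode_all.cut1, Vorbis.L.decode_all.at_10351d] span [Vorbis.L.textLo, Vorbis.L.textHi] side (v_side)
  -- the dead arms (`cap < 32`, `cmovns` not taken): closed bit-vector conditions the walker does not prune
  all_goals (try (first | exact absurd hbr_103559 (by decide) | exact absurd (by decide) hbr_103516))
  · v_inv
  · -- pre_103576: stb_vorbis_open_memory's precondition
    have heq : Mem.EqOn 0xC00000 0xE00000
        (storesMem u.mem (((u.reg .rsp).toNat - 184) / 8) Vorbis.Frames.decode_all.prologue) s_103576.mem := by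
      rw [w_mem]
      simp only [storesMem, Vorbis.Frames.decode_all, List.foldl]
      refine X86.User.Mem.EqOn.step_writeLE _ _ _ ?_ (by u_omega) (by u_omega)
      refine X86.User.Mem.EqOn.step_writeLE _ _ _ ?_ (by u_omega) (by u_omega)
      refine X86.User.Mem.EqOn.step_writeLE _ _ _ ?_ (by u_omega) (by u_omega)
      refine X86.User.Mem.EqOn.step_writeLE _ _ _ ?_ (by u_omega) (by u_omega)
      refine X86.User.Mem.EqOn.step_writeLE _ _ _ ?_ (by u_omega) (by u_omega)
      refine decode_all.da_eqOn_writeLE_congr ?_ (decode_all.da_shadow_addr_eq _ _ 12 (by omega) (by decide)) _ _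
      refine decode_all.da_eqOn_writeLE_congr ?_ (decode_all.da_shadow_addr_eq _ _ 8 (by omega) (by decide)) _ _
      refine decode_all.da_eqOn_writeLE_congr ?_ (decode_all.da_shadow_addr_eq _ _ 4 (by omega) (by decide)) _ _
      refine decode_all.da_eqOn_writeLE_congr ?_ (decode_all.da_shadow_addr_eq _ _ 0 (by omega) (by decide)) _ _
      u_eqon
    have e_rsp : (s_103576.reg .rsp).toNat = (u.reg .rsp).toNat - 240 := by
      rw [w_rsp]
      u_omega
    have e_rdx : (s_103576.reg .rdx).toNat = ((u.reg .rsp).toNat - 184) + 32 := by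
      rw [w_rdx]
      u_omega
    have e_rcx : (s_103576.reg .rcx).toNat = ((u.reg .rsp).toNat - 184) + 96 := by
      rw [w_rcx]
      u_omega
    have hinv := decode_all.da_shadow_prologue hsh heq ((u.reg .rsp).toNat - 232) (by omega) (by omega) (by omega)
    have hsame : Mem.SameExcept [⟨(u.reg .rsp).toNat - 240, (u.reg .rsp).toNat⟩, ⟨0xC00000, 0xE00000⟩]
        u.mem s_103576.mem := by
      u_same
    refine ⟨⟨?_, hsh.offText⟩, ?_, ?_, hlen, ?_, ?_, ?_, ?_, ?_, decode_all.da_fixedLive_push hfix _, hfree, ?_⟩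
    · rw [e_rsp]
      have e : (u.reg .rsp).toNat - 240 + 8 = (u.reg .rsp).toNat - 232 := by omega
      rw [e]
      exact hinv
    · rw [w_kept .rdi rfl]
      exact hrdi
    · rw [w_kept .rsi rfl]
      exact hrsi
    · rw [e_rdx]
      refine decode_all.da_stackObj 32 4 ?_ (by omega) (by omega) (by omega)
      unfold FrameLayout.objsAt Vorbis.Frames.decode_all
      simp only [List.map_cons, List.mem_cons, true_or]
    · rw [e_rcx]
      refine decode_all.da_stackObj 96 16 ?_ (by omega) (by omega) (by omega)
      unfold FrameLayout.objsAt Vorbis.Frames.decode_all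
      simp only [List.map_cons, List.mem_cons, true_or, or_true]
    · unfold Top.RangesApart
      rw [e_rdx, e_rcx]
      left
      omega
    · show s_103576.mem.readLE (addr (s_103576.reg .rcx).toNat) 8 = _
      rw [addr_toNat, w_rcx, w_mem]
      u_read
    · show s_103576.mem.readLE (addr ((s_103576.reg .rcx).toNat + 8)) 4 = _
      have ea : addr ((s_103576.reg .rcx).toNat + 8) = u.reg .rsp - 80 := by
        apply UInt64.toNat_inj.mp
        rw [toNat_addr _ (by omega), e_rcx]
        u_omega
      rw [ea, w_mem]
      have hv := decode_all.da_part32_of_s32 _ hr9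
      u_read
    · refine decode_all.da_consts_kept hconsts hsame ?_
      intro w hw
      simp only [List.mem_cons, List.not_mem_nil, or_false] at hw
      rcases hw with rfl | rfl
      · show 0x120650 ≤ (u.reg .rsp).toNat - 240
        omega
      · decide
  · -- after stb_vorbis_open_memory (0x10357b = cut1): the assertion `AtOpen`
    -- the own footprint up to the call (20 stores: the stack window and the shadow), BEFORE the callee's footprint is in sight
    have hs1 : Mem.SameExcept [⟨(u.reg .rsp).toNat - 240, (u.reg .rsp).toNat⟩, ⟨0xC00000, 0xE00000⟩]
        u.mem s_103576.mem := by
      rw [w_mem_103576]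
      u_same
    have hvlen := decode_all.da_part32_len _ len hrsi hlen
    v_after_call w_rsp_103576 w_mem_103576
    simp only [w_rdx_103576] at w_same
    -- the stack slots at the callee's entry, read through the prologue's stores …
    have hp0 : UInt64.ofNat (s_103576.mem.readLE (u.reg .rsp) 8) = ret := by u_resolve
    have hp15 : UInt64.ofNat (s_103576.mem.readLE (u.reg .rsp - 8) 8) = u.reg .r15 := by u_resolve
    have hp14 : UInt64.ofNat (s_103576.mem.readLE (u.reg .rsp - 16) 8) = u.reg .r14 := by u_resolve
    have hp13 : UInt64.ofNat (s_103576.mem.readLE (u.reg .rsp - 24) 8) = u.reg .r13 := by u_resolve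
    have hp12 : UInt64.ofNat (s_103576.mem.readLE (u.reg .rsp - 32) 8) = u.reg .r12 := by u_resolve
    have hpbp : UInt64.ofNat (s_103576.mem.readLE (u.reg .rsp - 40) 8) = u.reg .rbp := by u_resolve
    have hpbx : UInt64.ofNat (s_103576.mem.readLE (u.reg .rsp - 48) 8) = u.reg .rbx := by u_resolve
    have hpout : s_103576.mem.readLE (u.reg .rsp - 216) 8 = 4194304 := by
      rw [w_mem_103576]
      u_read
    have hproom : s_103576.mem.readLE (u.reg .rsp - 224) 8 = ((3145696#64).sshiftRight 2).toNat := by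
      rw [w_mem_103576]
      u_read
    have hplen : s_103576.mem.readLE (u.reg .rsp - 204) 4 = len := by
      rw [w_mem_103576, ← hvlen]
      u_read
    rw [w_mem_103576] at hp0 hp15 hp14 hp13 hp12 hpbp hpbx hpout hproom hplen
    -- … and through the callee's footprint
    have q0 : UInt64.ofNat (s_103576r.mem.readLE (u.reg .rsp) 8) = ret := by u_frame hp0
    have q15 : UInt64.ofNat (s_103576r.mem.readLE (u.reg .rsp - 8) 8) = u.reg .r15 := by u_frame hp15
    have q14 : UInt64.ofNat (s_103576r.mem.readLE (u.reg .rsp - 16) 8) = u.reg .r14 := by u_frame hp14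
    have q13 : UInt64.ofNat (s_103576r.mem.readLE (u.reg .rsp - 24) 8) = u.reg .r13 := by u_frame hp13
    have q12 : UInt64.ofNat (s_103576r.mem.readLE (u.reg .rsp - 32) 8) = u.reg .r12 := by u_frame hp12
    have qbp : UInt64.ofNat (s_103576r.mem.readLE (u.reg .rsp - 40) 8) = u.reg .rbp := by u_frame hpbp
    have qbx : UInt64.ofNat (s_103576r.mem.readLE (u.reg .rsp - 48) 8) = u.reg .rbx := by u_frame hpbx
    have qout : s_103576r.mem.readLE (u.reg .rsp - 216) 8 = 4194304 := by u_frame hpout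
    have qroom : s_103576r.mem.readLE (u.reg .rsp - 224) 8 = ((3145696#64).sshiftRight 2).toNat := by u_frame hproom
    have qlen : s_103576r.mem.readLE (u.reg .rsp - 204) 4 = len := by u_frame hplen
    -- the footprint so far: the contract's five windows, through the own stores and the callee's footprint
    rw [← w_mem_103576] at w_same
    have hsame0 : Mem.SameExcept [⟨(u.reg .rsp).toNat - 6448, (u.reg .rsp).toNat⟩, ⟨0x400000, 0x700000⟩,
        ⟨0x800000, 0xC00000⟩, ⟨0xC00000, 0xE00000⟩, ⟨0x121c00, 0x122000⟩] u.mem u.mem := Mem.SameExcept.refl _ _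
    have hsame1 := seg1_through_callee hsame0 hs1 (by
      simp only [List.forall_mem_cons, List.not_mem_nil, false_imp_iff, implies_true, and_true, X86.User.inSpans_cons,
        X86.User.inSpans_nil, or_false]
      repeat' apply And.intro
      all_goals u_omega)
    have hsame := seg1_through_callee hsame1 w_same (by
      simp only [List.forall_mem_cons, List.not_mem_nil, false_imp_iff, implies_true, and_true, X86.User.inSpans_cons,
        X86.User.inSpans_nil, or_false]
      repeat' apply And.intro
      all_goals u_omega)
    obtain ⟨others', hgrown, hcase⟩ := w_post
    obtain ⟨hinv1, hfixed1, hoffT1⟩ := hgrown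
    have e_top : (s_103576r.reg .rsp).toNat = (u.reg .rsp).toNat - 232 := by
      rw [w_rsp]
      u_omega
    rw [e_top] at hinv1
    have eroom : ((3145696#64).sshiftRight 2).toNat = 786424 := by decide
    rw [eroom] at qroom
    refine ReachVia.done ⟨others', ?_⟩
    have hfrm : decode_all.DFrame others frames len u₀ u ret others' s_103576r :=
      ⟨he0, hpre0, w_rsp, q15, q14, q13, q12, qbp, qbx, q0, qout, hsame, w_code, w_inv, hinv1, hfixed1, hoffT1⟩
    exact ⟨w_rip, hfrm, w_r13, w_rbx, w_rbp, qroom, qlen, hcase⟩
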